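-- pv_equiv track=rewrite | github.com/OctaveLarose/adventofcode | 2021/day10.py | get_corrupted_char_in_line
-- ===== SOURCE A (Python) =====
-- def reduce_stack(stack):
--     while len(stack) != 0 and stack[-1] in ")]}>":
--         if ''.join(stack[-2:]) in ['()', '[]', '{}', '<>']:
--             stack = stack[:-2]
--         else:
--             return None
--     return stack
--
-- def get_corrupted_char_in_line(line) -> (bool, str):
--     stack = []
--     for c in line:
--         stack = reduce_stack(stack + [c])
--
--         if stack is None:
--             return c
--
--         if len(stack) == 0:
--             return None
--
--     return None
-- ===== SOURCE B (Python) =====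
-- PAIRS = {')': '(', ']': '[', '}': '{', '>': '<'}
--
-- def get_corrupted_char_in_line(line) -> (bool, str):
--     # Single O(n) pass: push non-closers, pop on a matching closer,
--     # stop (like A) as soon as the stack empties or a closer mismatches.
--     stack = []
--     for c in line:
--         if c in PAIRS:
--             if not stack or stack[-1] != PAIRS[c]:
--                 return c
--             stack.pop()
--             if not stack:
--                 return None
--         else:
--             stack.append(c)
--     return None
-- ===== Notes on version B (the rewrite author's own statement) =====
-- stated objective: faster
-- what changed: A rebuilds the stack with list copies (stack + [c], stack[:-2]) and re-joins/rescans its tail at every character; B keeps one mutable stack with append/pop and a matching-pair dict lookup, a single O(n) pass (including A's early stop once the stack empties).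
import Mathlib
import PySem

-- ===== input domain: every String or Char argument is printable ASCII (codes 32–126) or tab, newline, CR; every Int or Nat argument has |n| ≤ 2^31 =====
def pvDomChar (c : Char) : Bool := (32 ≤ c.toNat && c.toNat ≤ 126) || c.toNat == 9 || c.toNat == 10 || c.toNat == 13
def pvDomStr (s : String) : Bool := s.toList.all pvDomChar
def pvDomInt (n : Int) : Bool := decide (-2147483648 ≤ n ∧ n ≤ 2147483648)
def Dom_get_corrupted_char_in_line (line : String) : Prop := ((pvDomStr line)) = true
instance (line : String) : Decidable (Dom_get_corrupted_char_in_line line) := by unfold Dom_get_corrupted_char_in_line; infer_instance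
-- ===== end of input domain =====

-- B replaces A's rebuild-and-rescan of the whole stack at every character by a single
-- O(n) stack with push/pop and a matching-pair dict lookup (return value equivalence).

-- ===== PORT A =====
-- closers: the string ")]}>" as chars
def pvClosersA : List Char := [')', ']', '}', '>']
-- the list ['()', '[]', '{}', '<>'] as char lists (''.join of two ASCII chars compared by content)
def pvPairsOkA : List (List Char) := [['(', ')'], ['[', ']'], ['{', '}'], ['<', '>']]

-- while len(stack) != 0 and stack[-1] in ")]}>": …
def reduce_stack (stack : List Char) : Option (List Char) :=
  if stack.length ≠ 0 ∧ stack.getLastD ' ' ∈ pvClosersA then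
    -- ''.join(stack[-2:]) in ['()', '[]', '{}', '<>']  (stack[-2:] = drop (len-2))
    if stack.drop (stack.length - 2) ∈ pvPairsOkA then
      reduce_stack (stack.take (stack.length - 2))  -- stack = stack[:-2]
    else none
  else some stack
termination_by stack.length
decreasing_by
  rename_i h _
  simp only [List.length_take]
  omega

-- the for-loop over the line, with early returns
def goA (stack : List Char) : List Char → Option String
  | [] => none
  | c :: rest =>
    match reduce_stack (stack ++ [c]) with
    | none => some (String.ofList [c])          -- return c
    | some s => if s.length = 0 then none   -- return None
                else goA s rest

def get_corrupted_char_in_line (line : String) : Option String :=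
  goA [] line.toList

-- ===== PORT B =====
-- PAIRS = {')': '(', ']': '[', '}': '{', '>': '<'}
def pvPairsB : PySem.Dict Char Char := PySem.Dict.ofList [(')', '('), (']', '['), ('}', '{'), ('>', '<')]

-- B's stack is kept top-first (Python's append/pop at the end = cons/tail at the head)
def goB (stack : List Char) : List Char → Option String
  | [] => none
  | c :: rest =>
    match PySem.Dict.get? pvPairsB c with    -- c in PAIRS / PAIRS[c]
    | some o =>
      match stack with
      | [] => some (String.ofList [c])           -- not stack → return c
      | t :: s' =>
        if t ≠ o then some (String.ofList [c])   -- stack[-1] != PAIRS[c] → return c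
        else if s' = [] then none            -- stack emptied → return None
        else goB s' rest
    | none => goB (c :: stack) rest          -- stack.append(c)

def get_corrupted_char_in_line_alt (line : String) : Option String :=
  goB [] line.toList

-- ===== PRECONDITION & SPEC =====
def Spec_get_corrupted_char_in_line (line : String) (out : Option String) : Prop := out = get_corrupted_char_in_line_alt line
instance (line : String) (out : Option String) : Decidable (Spec_get_corrupted_char_in_line line out) := by unfold Spec_get_corrupted_char_in_line; infer_instance

-- ===== CLAIM (what is proved, stated in full; the proofs are below) =====
def Claim_equal_get_corrupted_char_in_line : Prop := ∀ (line : String), Dom_get_corrupted_char_in_line line → Spec_get_corrupted_char_in_line line (get_corrupted_char_in_line line)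

-- ===== LEMMAS AND PROOFS =====

-- a stack of non-closers is left unchanged by reduce_stack
lemma reduce_stack_fix (s : List Char) (h : ∀ x ∈ s, x ∉ pvClosersA) :
    reduce_stack s = some s := by
  rw [reduce_stack]
  rcases s.eq_nil_or_concat with rfl | ⟨s', t, rfl⟩
  · simp
  · have ht : t ∉ pvClosersA := h t (by simp)
    simp [ht]

lemma reduce_stack_push_open (s : List Char) (c : Char) (hc : c ∉ pvClosersA) :
    reduce_stack (s ++ [c]) = some (s ++ [c]) := by
  rw [reduce_stack]
  simp [hc]

lemma reduce_stack_closer_nil (c : Char) (hc : c ∈ pvClosersA) :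
    reduce_stack [c] = none := by
  fin_cases hc <;> (rw [reduce_stack]; simp [pvPairsOkA]) <;> decide

lemma reduce_stack_closer_concat (s : List Char) (t c : Char)
    (hs : ∀ x ∈ s, x ∉ pvClosersA) (hc : c ∈ pvClosersA) :
    reduce_stack ((s ++ [t]) ++ [c]) =
      if [t, c] ∈ pvPairsOkA then some s else none := by
  rw [reduce_stack]
  have hlen : ((s ++ [t]) ++ [c]).length - 2 = s.length := by simp
  have hdrop : ((s ++ [t]) ++ [c]).drop (((s ++ [t]) ++ [c]).length - 2) = [t, c] := by
    rw [hlen]; simp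
  have htake : ((s ++ [t]) ++ [c]).take (((s ++ [t]) ++ [c]).length - 2) = s := by
    rw [hlen]; simp
  rw [hdrop, htake]
  simp only [List.getLastD_concat]
  split_ifs with h1 h2 h2
  · exact reduce_stack_fix s hs
  · rfl
  · exact absurd ⟨by simp, hc⟩ h1
  · exact absurd ⟨by simp, hc⟩ h1

-- the pair test of A against the dict lookup of B, for a closer c
lemma pair_iff_lookup (t c : Char) (hc : c ∈ pvClosersA) :
    ([t, c] ∈ pvPairsOkA ↔ PySem.Dict.get? pvPairsB c = some t) := by
  have h1 : PySem.Dict.get? pvPairsB ')' = some '(' := rfl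
  have h2 : PySem.Dict.get? pvPairsB ']' = some '[' := rfl
  have h3 : PySem.Dict.get? pvPairsB '}' = some '{' := rfl
  have h4 : PySem.Dict.get? pvPairsB '>' = some '<' := rfl
  fin_cases hc <;> simp [pvPairsOkA, h1, h2, h3, h4, eq_comm]

lemma lookup_none_of_not_closer (c : Char) (hc : c ∉ pvClosersA) :
    PySem.Dict.get? pvPairsB c = none := by
  rw [PySem.Dict.get?_eq_none_iff_contains]
  rw [show (pvPairsB.contains c) = decide (c ∈ pvPairsB.keys) from by
    rw [Bool.eq_iff_iff]; simp [PySem.Dict.contains_iff_mem_keys]]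
  simp [show pvPairsB.keys = pvClosersA from rfl, hc]

lemma go_eq (l : List Char) : ∀ (stack : List Char),
    (∀ x ∈ stack, x ∉ pvClosersA) → goA stack l = goB stack.reverse l := by
  induction l with
  | nil => intro stack _; rfl
  | cons c rest ih =>
    intro stack hstack
    by_cases hc : c ∈ pvClosersA
    · rcases stack.eq_nil_or_concat with rfl | ⟨s', t, rfl⟩
      · -- empty stack, closer ⇒ both report c
        rw [goA, show ([] : List Char) ++ [c] = [c] from rfl,
           reduce_stack_closer_nil c hc]
        fin_cases hc <;> rfl
      · simp only [List.concat_eq_append] at hstack ⊢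
        have hs' : ∀ x ∈ s', x ∉ pvClosersA := fun x hx => hstack x (by simp [hx])
        have ht : t ∉ pvClosersA := hstack t (by simp)
        obtain ⟨o, ho⟩ : ∃ o, PySem.Dict.get? pvPairsB c = some o := by
          fin_cases hc <;> exact ⟨_, rfl⟩
        rw [goA, reduce_stack_closer_concat s' t c hs' hc]
        rw [show (s' ++ [t]).reverse = t :: s'.reverse by simp]
        rw [goB]
        simp only [ho]
        by_cases hp : [t, c] ∈ pvPairsOkA
        · have hot : o = t := by
            have h2 := (pair_iff_lookup t c hc).1 hp
            rw [ho] at h2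
            exact Option.some_inj.mp h2
          subst hot
          by_cases hs0 : s' = []
          · subst hs0; simp [hp]
          · have hrev : s'.reverse ≠ [] := by simpa using hs0
            simp [hp, hs0, hrev, ih s' hs']
        · have hto : t ≠ o := by
            intro h; apply hp
            exact (pair_iff_lookup t c hc).2 (by rw [ho, h])
          simp [hp, hto]
    · -- non-closer: pushed in both versions
      rw [goA, reduce_stack_push_open stack c hc]
      have hne : (stack ++ [c]).length ≠ 0 := by simp
      rw [goB]
      simp only [lookup_none_of_not_closer c hc]
      have := ih (stack ++ [c]) (by
        intro x hx
        rcases List.mem_append.1 hx with hx | hx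
        · exact hstack x hx
        · simp at hx; subst hx; exact hc)
      simpa [hne, List.reverse_append] using this

theorem goA_eq_goB (line : String) :
    get_corrupted_char_in_line line = get_corrupted_char_in_line_alt line := by
  have := go_eq line.toList [] (by simp)
  simpa [get_corrupted_char_in_line, get_corrupted_char_in_line_alt] using this

-- ===== VERDICT (by name: the statement is the Claim_ definition above) =====
theorem get_corrupted_char_in_line_spec : Claim_equal_get_corrupted_char_in_line := by
  intro line _
  exact goA_eq_goB line
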